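-- pv_equiv track=rewrite | github.com/olsenlabmit/NERD | Tools/polymersearch/graphs.py | get_repeats
-- ===== SOURCE A (Python) =====
-- def get_repeats(object):
--     object = object[object.find("]")+1:] # between the terminal descriptors
--     object = object[:object.rfind("[")]
--
--     def between_brackets(object, i):
--         j = i
--         merge1 = False
--         while j >= 0:
--             if object[j] == "]":
--                 return False
--             elif object[j] == "[":
--                 merge1 = True
--                 break
--             j -= 1
--         if not merge1:
--             return False
--         j = i
--         while j < len(object):
--             if object[j] == "[":
--                 return False
--             elif object[j] == "]":
--                 return True
--             j += 1
--         return False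
--
--     i = 0
--     o = []
--     count = 0
--     repeat = ""
--     object += ","
--     while i < len(object):
--         if object[i] == "{":
--             count += 1
--         if object[i] == "}":
--             count -= 1
--         if object[i] == "," and not between_brackets(object, i) and count == 0:
--             o.append(repeat)
--             repeat = ""
--         else:
--             repeat += object[i]
--         i += 1
--
--     repeats = [[],[]]
--     index = 0
--     for i in range(len(o)):
--         if ";" in o[i] and not between_brackets(o[i], o[i].find(";")):
--             o[i].split(";")
--             repeats[index].append(o[i][:o[i].index(";")])
--             index += 1
--             repeats[index].append(o[i][o[i].index(";")+1:])
--         else: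
--             repeats[index].append(o[i])
--
--     return repeats[0], repeats[1]
-- ===== SOURCE B (Python) =====
-- def get_repeats(object):
--     core = object[object.find("]")+1:]
--     core = core[:core.rfind("[")]
--     s = core + ","
--
--     def last_bracket(x):
--         for c in reversed(x):
--             if c == "[" or c == "]":
--                 return c
--         return ""
--
--     def first_bracket(x):
--         for c in x:
--             if c == "[" or c == "]":
--                 return c
--         return ""
--
--     # precomputed masks: nearest bracket to the left is '[' / to the right is ']'
--     n = len(s)
--     left = [False] * n
--     cur = False
--     for i in range(n):
--         c = s[i]
--         if c == "[":
--             cur = True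
--         elif c == "]":
--             cur = False
--         left[i] = cur
--     right = [False] * n
--     cur = False
--     for i in range(n - 1, -1, -1):
--         c = s[i]
--         if c == "]":
--             cur = True
--         elif c == "[":
--             cur = False
--         right[i] = cur
--
--     # one pass: split on commas that are at brace depth 0 and not between brackets
--     tokens = []
--     buf = ""
--     depth = 0
--     for i in range(n):
--         c = s[i]
--         if c == "{":
--             depth += 1
--         elif c == "}":
--             depth -= 1
--         if c == "," and depth == 0 and not (left[i] and right[i]):
--             tokens.append(buf)
--             buf = ""
--         else:
--             buf += c
--
--     # distribute tokens, switching lists at the first unbracketed semicolon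
--     first, second = [], []
--     in_second = False
--     for t in tokens:
--         k = t.find(";")
--         if k != -1 and not (last_bracket(t[:k]) == "[" and first_bracket(t[k+1:]) == "]"):
--             (second if in_second else first).append(t[:k])
--             in_second = True
--             second.append(t[k+1:])
--         else:
--             (second if in_second else first).append(t)
--     return first, second
-- ===== Notes on version B (the rewrite author's own statement) =====
-- stated objective: faster
-- what changed: A rescans left and right from every comma and semicolon to decide whether it lies inside a bracket pair (O(n) per comma); B precomputes two nearest-bracket masks in two linear passes, tokenises in one scan using them, and fills the two output lists directly with an in_second flag instead of a repeats list with a moving index.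
import Mathlib
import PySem

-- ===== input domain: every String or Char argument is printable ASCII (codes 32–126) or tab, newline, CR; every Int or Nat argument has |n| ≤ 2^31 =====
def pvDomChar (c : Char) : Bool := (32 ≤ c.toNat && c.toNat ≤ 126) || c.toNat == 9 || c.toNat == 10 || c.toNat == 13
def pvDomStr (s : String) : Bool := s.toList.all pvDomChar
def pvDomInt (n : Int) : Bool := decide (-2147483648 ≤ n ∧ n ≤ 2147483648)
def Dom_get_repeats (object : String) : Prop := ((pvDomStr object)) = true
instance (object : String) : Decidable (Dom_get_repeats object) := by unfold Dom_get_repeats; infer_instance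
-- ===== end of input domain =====

-- B replaces A's per-comma left-and-right bracket scans by two precomputed nearest-bracket
-- masks and emits the two lists directly from one token pass (objective: faster tokenisation).

-- ===== PORT A =====

-- first while loop of between_brackets: scan left from j for the nearest bracket
def pvBBLeft (s : List Char) (j : Nat) : Bool :=
  if h : j < s.length then
    if s[j] = ']' then false
    else if s[j] = '[' then true
    else if j = 0 then false
    else pvBBLeft s (j - 1)
  else false
termination_by j
decreasing_by omega

-- second while loop of between_brackets: scan right from j
def pvBBRight (s : List Char) (j : Nat) : Bool :=
  if h : j < s.length then
    if s[j] = '[' then false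
    else if s[j] = ']' then true
    else pvBBRight s (j + 1)
  else false
termination_by s.length - j

def pvBetween (s : List Char) (i : Nat) : Bool := pvBBLeft s i && pvBBRight s i

-- A's main while loop: state (count, repeat, o)
def pvMainA (s : List Char) (i : Nat) (count : Int) (rep : List Char)
    (o : List (List Char)) : List (List Char) :=
  if h : i < s.length then
    let count1 := if s[i] = '{' then count + 1 else count
    let count2 := if s[i] = '}' then count1 - 1 else count1
    if s[i] = ',' ∧ pvBetween s i = false ∧ count2 = 0 then
      pvMainA s (i + 1) count2 [] (o ++ [rep])
    else
      pvMainA s (i + 1) count2 (rep ++ [s[i]]) o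
  else o
termination_by s.length - i

-- repeats[index].append(v); Python raises IndexError for index ≥ 2 — those inputs are outside Pre_
def pvAppendAt (reps : List (List (List Char))) (i : Nat) (v : List Char) :
    List (List (List Char)) :=
  PySem.List.pySetD reps i (PySem.List.pyGetD reps i [] ++ [v])

-- A's second for loop (the discarded `o[i].split(";")` has no effect and is omitted)
def pvPhase2A : List (List Char) → List (List (List Char)) → Nat → List (List (List Char))
  | [], reps, _ => reps
  | t :: ts, reps, index =>
    let k := PySem.Chars.find t [';']
    if PySem.Chars.isIn [';'] t = true ∧ pvBetween t k.toNat = false then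
      let reps1 := pvAppendAt reps index (PySem.List.slice t none (some k))
      let reps2 := pvAppendAt reps1 (index + 1) (PySem.List.slice t (some (k + 1)) none)
      pvPhase2A ts reps2 (index + 1)
    else
      pvPhase2A ts (pvAppendAt reps index t) index

-- object = object[object.find("]")+1:] ; object = object[:object.rfind("[")]
def pvCoreA (object : String) : List Char :=
  let cs0 := object.toList
  let cs1 := PySem.List.slice cs0 (some (PySem.Chars.find cs0 [']'] + 1)) none
  PySem.List.slice cs1 none (some (PySem.Chars.rfind cs1 ['[']))

def get_repeats (object : String) : List String × List String :=
  let s := pvCoreA object ++ [',']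
  let o := pvMainA s 0 0 [] []
  let reps := pvPhase2A o [[], []] 0
  ((PySem.List.pyGetD reps 0 []).map String.ofList,
   (PySem.List.pyGetD reps 1 []).map String.ofList)

-- ===== PORT B =====

-- first_bracket helper of B
def pvFB : List Char → Option Char
  | [] => none
  | c :: cs => if c = '[' ∨ c = ']' then some c else pvFB cs

-- last_bracket helper of B
def pvLB (x : List Char) : Option Char := pvFB x.reverse

-- B's mask loops: running nearest-bracket state, one Bool per character
def pvMaskScan (op cl : Char) : List Char → Bool → List Bool
  | [], _ => []
  | c :: cs, cur =>
    let cur' := if c = op then true else if c = cl then false else cur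
    cur' :: pvMaskScan op cl cs cur'

-- B's single tokenising pass over the characters and the two masks
def pvMainB : List Char → List Bool → List Bool → Int → List Char → List (List Char) →
    List (List Char)
  | c :: cs, l :: ls, r :: rs, depth, buf, toks =>
    let depth' := if c = '{' then depth + 1 else if c = '}' then depth - 1 else depth
    if c = ',' ∧ depth' = 0 ∧ (l && r) = false then
      pvMainB cs ls rs depth' [] (toks ++ [buf])
    else
      pvMainB cs ls rs depth' (buf ++ [c]) toks
  | _, _, _, _, _, toks => toks

-- B's distribution loop: two lists and an in_second flag
def pvPhase2B : List (List Char) → List (List Char) → List (List Char) → Bool →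
    List (List Char) × List (List Char)
  | [], first, second, _ => (first, second)
  | t :: ts, first, second, insec =>
    let k := PySem.Chars.find t [';']
    if k ≠ -1 ∧ ¬(pvLB (t.take k.toNat) = some '[' ∧ pvFB (t.drop (k.toNat + 1)) = some ']') then
      if insec then
        pvPhase2B ts first ((second ++ [t.take k.toNat]) ++ [t.drop (k.toNat + 1)]) true
      else
        pvPhase2B ts (first ++ [t.take k.toNat]) (second ++ [t.drop (k.toNat + 1)]) true
    else
      if insec then pvPhase2B ts first (second ++ [t]) true
      else pvPhase2B ts (first ++ [t]) second false

-- identical stripping lines of Source B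
def pvCoreB (object : String) : List Char :=
  let cs0 := object.toList
  let cs1 := PySem.List.slice cs0 (some (PySem.Chars.find cs0 [']'] + 1)) none
  PySem.List.slice cs1 none (some (PySem.Chars.rfind cs1 ['[']))

def get_repeats_alt (object : String) : List String × List String :=
  let s := pvCoreB object ++ [',']
  let left := pvMaskScan '[' ']' s false
  let right := (pvMaskScan ']' '[' s.reverse false).reverse
  let toks := pvMainB s left right 0 [] []
  let p := pvPhase2B toks [] [] false
  (p.1.map String.ofList, p.2.map String.ofList)

-- ===== PRECONDITION & SPEC =====

-- a token the second loops split: it has a ';' whose surrounding brackets test fails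
-- (stated with B's structural helpers so the Decidable instances compute by kernel reduction;
-- pvSplitTok_iff below proves it equal to A's `';' in o[i] and not between_brackets` test)
def pvIsSplitTok (t : List Char) : Bool :=
  decide (PySem.Chars.find t [';'] ≠ -1 ∧
    ¬(pvLB (t.take (PySem.Chars.find t [';']).toNat) = some '[' ∧
      pvFB (t.drop ((PySem.Chars.find t [';']).toNat + 1)) = some ']'))

-- the comma tokenisation of the stripped core (B's structural form; equals A's by pvMain_eq)
def pvTokens (object : String) : List (List Char) :=
  pvMainB (pvCoreA object ++ [','])
    (pvMaskScan '[' ']' (pvCoreA object ++ [',']) false)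
    ((pvMaskScan ']' '[' (pvCoreA object ++ [',']).reverse false).reverse) 0 [] []

-- Pre_ excludes EXACTLY the inputs on which A raises (IndexError at `repeats[2].append`):
-- those whose comma tokenisation produces two or more semicolon-split tokens; there B simply
-- keeps appending to the second list. On every input where A returns a value, Pre_ holds.
-- The crash set is inherently defined by the tokenisation itself, so Pre_ states it through
-- the (structural) tokeniser above; it is not narrowed beyond A's actual crash set.
def Pre_get_repeats (object : String) : Prop :=
  (pvTokens object).countP pvIsSplitTok ≤ 1
instance (object : String) : Decidable (Pre_get_repeats object) := by
  unfold Pre_get_repeats; infer_instance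

def pvWitness_get_repeats : String := "]a,b;c["

def Spec_get_repeats (object : String) (out : List String × List String) : Prop :=
  out = get_repeats_alt object
instance (object : String) (out : List String × List String) :
    Decidable (Spec_get_repeats object out) := by unfold Spec_get_repeats; infer_instance

-- ===== CLAIM (what is proved, stated in full; the proofs are below) =====
def Claim_equal_get_repeats : Prop := ∀ (object : String), Dom_get_repeats object →
  Pre_get_repeats object → Spec_get_repeats object (get_repeats object)

-- ===== LEMMAS AND PROOFS =====

-- zeta-free one-step unfoldings of the ports' loops
lemma pvMainB_cons (c : Char) (cs : List Char) (l r : Bool) (ls rs : List Bool) (d : Int)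
    (buf : List Char) (toks : List (List Char)) :
    pvMainB (c :: cs) (l :: ls) (r :: rs) d buf toks =
      if c = ',' ∧ (if c = '{' then d + 1 else if c = '}' then d - 1 else d) = 0 ∧
          (l && r) = false then
        pvMainB cs ls rs (if c = '{' then d + 1 else if c = '}' then d - 1 else d) []
          (toks ++ [buf])
      else
        pvMainB cs ls rs (if c = '{' then d + 1 else if c = '}' then d - 1 else d)
          (buf ++ [c]) toks := rfl

lemma pvMainB_nil (d : Int) (buf : List Char) (toks : List (List Char)) :
    pvMainB [] [] [] d buf toks = toks := rfl

lemma pvPhase2A_cons (t : List Char) (ts : List (List Char)) (reps : List (List (List Char)))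
    (index : Nat) :
    pvPhase2A (t :: ts) reps index =
      if PySem.Chars.isIn [';'] t = true ∧
          pvBetween t (PySem.Chars.find t [';']).toNat = false then
        pvPhase2A ts
          (pvAppendAt (pvAppendAt reps index
              (PySem.List.slice t none (some (PySem.Chars.find t [';']))))
            (index + 1) (PySem.List.slice t (some (PySem.Chars.find t [';'] + 1)) none))
          (index + 1)
      else
        pvPhase2A ts (pvAppendAt reps index t) index := rfl

lemma pvPhase2B_cons (t : List Char) (ts : List (List Char)) (f sec : List (List Char))
    (insec : Bool) :
    pvPhase2B (t :: ts) f sec insec =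
      if PySem.Chars.find t [';'] ≠ -1 ∧
          ¬(pvLB (t.take (PySem.Chars.find t [';']).toNat) = some '[' ∧
            pvFB (t.drop ((PySem.Chars.find t [';']).toNat + 1)) = some ']') then
        if insec then
          pvPhase2B ts f ((sec ++ [t.take (PySem.Chars.find t [';']).toNat]) ++
            [t.drop ((PySem.Chars.find t [';']).toNat + 1)]) true
        else
          pvPhase2B ts (f ++ [t.take (PySem.Chars.find t [';']).toNat])
            (sec ++ [t.drop ((PySem.Chars.find t [';']).toNat + 1)]) true
      else
        if insec then pvPhase2B ts f (sec ++ [t]) true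
        else pvPhase2B ts (f ++ [t]) sec false := rfl

lemma pvAppendAt_zero (f sec : List (List Char)) (v : List Char) :
    pvAppendAt [f, sec] 0 v = [f ++ [v], sec] := by
  simp [pvAppendAt, PySem.List.pySetD, PySem.List.pySet?, PySem.List.pyGetD,
    PySem.List.pyGet?, PySem.List.pyIdx?]

lemma pvAppendAt_one (f sec : List (List Char)) (v : List Char) :
    pvAppendAt [f, sec] 1 v = [f, sec ++ [v]] := by
  simp [pvAppendAt, PySem.List.pySetD, PySem.List.pySet?, PySem.List.pyGetD,
    PySem.List.pyGet?, PySem.List.pyIdx?]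

-- running mask state = fold over the processed prefix
def pvMState (op cl : Char) (l : List Char) (cur : Bool) : Bool :=
  l.foldl (fun b c => if c = op then true else if c = cl then false else b) cur

lemma pvMaskScan_length (op cl : Char) : ∀ (s : List Char) (cur : Bool),
    (pvMaskScan op cl s cur).length = s.length := by
  intro s
  induction s with
  | nil => intro cur; rfl
  | cons c cs ih => intro cur; simp [pvMaskScan, ih]

lemma pvMaskScan_get (op cl : Char) : ∀ (s : List Char) (cur : Bool) (i : Nat),
    i < s.length → (pvMaskScan op cl s cur)[i]? = some (pvMState op cl (s.take (i + 1)) cur) := by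
  intro s
  induction s with
  | nil => intro cur i h; simp at h
  | cons c cs ih =>
    intro cur i h
    cases i with
    | zero => simp [pvMaskScan, pvMState]
    | succ i =>
      simp only [pvMaskScan]
      rw [List.getElem?_cons_succ, ih _ i (by simpa using h)]
      simp [pvMState]

lemma pvMState_left (l : List Char) (cur : Bool) :
    pvMState '[' ']' l cur =
      (match pvFB l.reverse with | none => cur | some c => decide (c = '[')) := by
  induction l using List.reverseRecOn with
  | nil => simp [pvMState, pvFB]
  | append_singleton l c ih =>
    simp only [pvMState, List.foldl_append, List.foldl, List.reverse_append,
      List.reverse_singleton, List.singleton_append, pvFB]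
    by_cases h1 : c = '['
    · simp [h1]
    · by_cases h2 : c = ']'
      · simp [h2]
      · simp [h1, h2, pvMState] at ih ⊢; exact ih

lemma pvMState_right (l : List Char) (cur : Bool) :
    pvMState ']' '[' l cur =
      (match pvFB l.reverse with | none => cur | some c => decide (c = ']')) := by
  induction l using List.reverseRecOn with
  | nil => simp [pvMState, pvFB]
  | append_singleton l c ih =>
    simp only [pvMState, List.foldl_append, List.foldl, List.reverse_append,
      List.reverse_singleton, List.singleton_append, pvFB]
    by_cases h1 : c = '['
    · simp [h1]
    · by_cases h2 : c = ']'
      · simp [h2]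
      · simp [h1, h2, pvMState] at ih ⊢; exact ih

lemma pvBBLeft_eq (s : List Char) : ∀ (i : Nat), i < s.length →
    pvBBLeft s i = decide (pvFB ((s.take (i + 1)).reverse) = some '[') := by
  intro i
  induction i with
  | zero =>
    intro h
    rw [pvBBLeft]
    simp only [h, dif_pos]
    rw [List.take_succ]
    simp only [List.take_zero, List.nil_append, List.getElem?_eq_getElem h]
    by_cases h1 : s[0] = ']'
    · simp [h1, pvFB]
    · by_cases h2 : s[0] = '['
      · simp [h1, h2, pvFB]
      · simp [h1, h2, pvFB]
  | succ i ih =>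
    intro h
    rw [pvBBLeft]
    simp only [h, dif_pos]
    rw [List.take_succ]
    simp only [List.getElem?_eq_getElem h, Option.toList_some, List.reverse_append,
      List.reverse_singleton, List.singleton_append]
    by_cases h1 : s[i+1] = ']'
    · simp [h1, pvFB]
    · by_cases h2 : s[i+1] = '['
      · simp [h2, pvFB]
      · have := ih (by omega)
        simp [h1, h2, pvFB, this]

lemma pvBBRight_eq (s : List Char) : ∀ (i : Nat),
    pvBBRight s i = decide (pvFB (s.drop i) = some ']') := by
  intro i
  induction hn : s.length - i using Nat.strong_induction_on generalizing i with
  | _ n ihn =>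
    rw [pvBBRight]
    by_cases h : i < s.length
    · rw [dif_pos h]
      rw [List.drop_eq_getElem_cons h]
      by_cases h1 : s[i] = '['
      · simp [h1, pvFB]
      · by_cases h2 : s[i] = ']'
        · simp [h2, pvFB]
        · have hrec := ihn (s.length - (i + 1)) (by omega) (i + 1) rfl
          simp [h1, h2, pvFB, hrec]
    · rw [dif_neg h]
      rw [List.drop_eq_nil_of_le (by omega)]
      simp [pvFB]

lemma pvLeftMask_get (s : List Char) (i : Nat) (h : i < s.length) :
    (pvMaskScan '[' ']' s false)[i]? = some (pvBBLeft s i) := by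
  rw [pvMaskScan_get _ _ s false i h, pvMState_left, pvBBLeft_eq s i h]
  cases hfb : pvFB ((s.take (i + 1)).reverse) with
  | none => simp
  | some c => simp

lemma pvRightMask_get (s : List Char) (i : Nat) (h : i < s.length) :
    ((pvMaskScan ']' '[' s.reverse false).reverse)[i]? = some (pvBBRight s i) := by
  have hlen : (pvMaskScan ']' '[' s.reverse false).length = s.length := by
    rw [pvMaskScan_length]; simp
  rw [List.getElem?_reverse (by omega)]
  rw [hlen]
  rw [pvMaskScan_get _ _ _ false _ (by simp; omega)]
  have h1 : s.length - 1 - i + 1 = s.length - i := by omega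
  rw [h1]
  have h2 : s.reverse.take (s.length - i) = (s.drop i).reverse := by
    rw [List.take_reverse]
    congr 2
    omega
  rw [h2, pvMState_right, pvBBRight_eq]
  simp only [List.reverse_reverse]
  cases hfb : pvFB (s.drop i) with
  | none => simp
  | some c => simp

lemma pvMain_eq (s : List Char) : ∀ (i : Nat) (count : Int) (rep : List Char)
    (o : List (List Char)),
    pvMainA s i count rep o =
      pvMainB (s.drop i) ((pvMaskScan '[' ']' s false).drop i)
        (((pvMaskScan ']' '[' s.reverse false).reverse).drop i) count rep o := by
  intro i
  induction hn : s.length - i using Nat.strong_induction_on generalizing i with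
  | _ n ihn =>
    intro count rep o
    by_cases h : i < s.length
    · have hlenL : i < (pvMaskScan '[' ']' s false).length := by
        rw [pvMaskScan_length]; exact h
      have hlenR : i < ((pvMaskScan ']' '[' s.reverse false).reverse).length := by
        simp [pvMaskScan_length]; exact h
      have hL : (pvMaskScan '[' ']' s false)[i] = pvBBLeft s i := by
        have := pvLeftMask_get s i h
        rw [List.getElem?_eq_getElem hlenL] at this
        exact Option.some.inj this
      have hR : ((pvMaskScan ']' '[' s.reverse false).reverse)[i] = pvBBRight s i := by
        have := pvRightMask_get s i h
        rw [List.getElem?_eq_getElem hlenR] at this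
        exact Option.some.inj this
      rw [List.drop_eq_getElem_cons h, List.drop_eq_getElem_cons hlenL,
        List.drop_eq_getElem_cons hlenR, pvMainA, dif_pos h, pvMainB_cons, hL, hR]
      dsimp only []
      have hcnt : (if s[i] = '{' then count + 1 else if s[i] = '}' then count - 1 else count) =
          (if s[i] = '}' then (if s[i] = '{' then count + 1 else count) - 1
           else (if s[i] = '{' then count + 1 else count)) := by
        by_cases h1 : s[i] = '{'
        · have h2 : ¬ s[i] = '}' := by rw [h1]; decide
          simp [h1, h2]
        · simp [h1]
      rw [hcnt]
      simp only [pvBetween]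
      have hiff : (s[i] = ',' ∧ (pvBBLeft s i && pvBBRight s i) = false ∧
            (if s[i] = '}' then (if s[i] = '{' then count + 1 else count) - 1
             else (if s[i] = '{' then count + 1 else count)) = 0) ↔
          (s[i] = ',' ∧
            (if s[i] = '}' then (if s[i] = '{' then count + 1 else count) - 1
             else (if s[i] = '{' then count + 1 else count)) = 0 ∧
            (pvBBLeft s i && pvBBRight s i) = false) := by tauto
      exact if_congr hiff (ihn (s.length - (i + 1)) (by omega) (i + 1) rfl _ _ _)
        (ihn (s.length - (i + 1)) (by omega) (i + 1) rfl _ _ _)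
    · rw [List.drop_eq_nil_of_le (by omega), List.drop_eq_nil_of_le (by rw [pvMaskScan_length]; omega),
        List.drop_eq_nil_of_le (by simp [pvMaskScan_length]; omega), pvMainA, dif_neg h, pvMainB_nil]

-- facts about the first semicolon of a token that contains one
lemma pvSemi_facts (t : List Char) (hin : PySem.Chars.isIn [';'] t = true) :
    0 ≤ PySem.Chars.find t [';'] ∧
    (PySem.Chars.find t [';']).toNat < t.length ∧
    t[(PySem.Chars.find t [';']).toNat]? = some ';' := by
  have hinf : [';'] <:+: t := (PySem.Chars.isIn_iff_infix _ _).mp hin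
  have hne : PySem.Chars.find t [';'] ≠ -1 := by
    intro h0
    exact ((PySem.Chars.find_eq_neg_one_iff t [';']).mp h0) hinf
  have hfz : PySem.Chars.findFrom t [';'] ((0 : Nat) : Int) none = PySem.Chars.find t [';'] := by
    simpa using PySem.Chars.findFrom_zero t [';']
  have hspec := PySem.Chars.findFrom_natCast_spec t [';'] 0 (Nat.zero_le _)
    (by rw [hfz]; exact hne)
  rw [hfz] at hspec
  obtain ⟨h0, hpre, -⟩ := hspec
  have hdropne : t.drop (PySem.Chars.find t [';']).toNat ≠ [] := by
    intro hnil; rw [hnil] at hpre; simp at hpre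
  have hlt : (PySem.Chars.find t [';']).toNat < t.length := by
    by_contra hge
    exact hdropne (List.drop_eq_nil_of_le (by omega))
  refine ⟨by exact_mod_cast h0, hlt, ?_⟩
  obtain ⟨rest, hrest⟩ := hpre
  rw [List.getElem?_eq_getElem hlt]
  rw [List.drop_eq_getElem_cons hlt] at hrest
  simp only [List.cons_append] at hrest
  exact congrArg some (List.head_eq_of_cons_eq hrest).symm

-- A's between_brackets at the first ';' of t = B's last_bracket/first_bracket test
lemma pvBetween_semi (t : List Char) (hin : PySem.Chars.isIn [';'] t = true) :
    pvBetween t (PySem.Chars.find t [';']).toNat =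
      (decide (pvLB (t.take (PySem.Chars.find t [';']).toNat) = some '[') &&
       decide (pvFB (t.drop ((PySem.Chars.find t [';']).toNat + 1)) = some ']')) := by
  obtain ⟨h0, hlt, hget⟩ := pvSemi_facts t hin
  have hsc : t[(PySem.Chars.find t [';']).toNat] = ';' := by
    rw [List.getElem?_eq_getElem hlt] at hget
    exact Option.some.inj hget
  unfold pvBetween
  rw [pvBBLeft_eq t _ hlt, pvBBRight_eq t]
  congr 1
  · rw [List.take_succ, List.getElem?_eq_getElem hlt, hsc]
    simp only [Option.toList_some, List.reverse_append, List.reverse_singleton,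
      List.singleton_append, pvFB]
    have hns : ¬ (';' = '[' ∨ ';' = ']') := by decide
    simp [hns, pvLB]
  · rw [List.drop_eq_getElem_cons hlt, hsc]
    simp only [pvFB]
    have hns : ¬ (';' = '[' ∨ ';' = ']') := by decide
    simp [hns]

-- the split test: pvIsSplitTok t is A's condition and (by definition) B's condition
lemma pvSplitTok_iff (t : List Char) :
    pvIsSplitTok t = true ↔
      (PySem.Chars.isIn [';'] t = true ∧
        pvBetween t (PySem.Chars.find t [';']).toNat = false) := by
  unfold pvIsSplitTok
  rw [decide_eq_true_iff]
  by_cases hin : PySem.Chars.isIn [';'] t = true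
  · obtain ⟨h0, -, -⟩ := pvSemi_facts t hin
    have hbeq := pvBetween_semi t hin
    constructor
    · rintro ⟨-, hq⟩
      refine ⟨hin, ?_⟩
      rw [hbeq]
      simpa using hq
    · rintro ⟨-, hb⟩
      rw [hb] at hbeq
      refine ⟨by omega, ?_⟩
      rintro ⟨hx, hy⟩
      rw [hx, hy] at hbeq
      simp at hbeq
  · have hknone : PySem.Chars.find t [';'] = -1 := by
      rw [PySem.Chars.find_eq_neg_one_iff]
      intro hinf
      exact hin ((PySem.Chars.isIn_iff_infix _ _).mpr hinf)
    constructor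
    · rintro ⟨hx, -⟩; exact absurd hknone hx
    · rintro ⟨hx, -⟩; exact absurd hx hin

lemma pvPhase2_one : ∀ (ts : List (List Char)) (f sec : List (List Char)),
    ts.countP pvIsSplitTok = 0 →
    pvPhase2A ts [f, sec] 1 = [(pvPhase2B ts f sec true).1, (pvPhase2B ts f sec true).2] := by
  intro ts
  induction ts with
  | nil => intro f sec _; simp [pvPhase2A, pvPhase2B]
  | cons t ts ih =>
    intro f sec hcnt
    rw [List.countP_cons] at hcnt
    have hns : pvIsSplitTok t = false := by
      cases hx : pvIsSplitTok t
      · rfl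
      · rw [hx] at hcnt; simp at hcnt
    have hA : ¬ (PySem.Chars.isIn [';'] t = true ∧
        pvBetween t (PySem.Chars.find t [';']).toNat = false) := by
      rw [← pvSplitTok_iff, hns]; simp
    have hB := of_decide_eq_false hns
    rw [pvPhase2A_cons, pvPhase2B_cons, if_neg hA, if_neg hB, if_pos rfl, pvAppendAt_one]
    rw [hns] at hcnt
    exact ih f (sec ++ [t]) (by simpa using hcnt)

lemma pvPhase2_zero : ∀ (ts : List (List Char)) (f sec : List (List Char)),
    ts.countP pvIsSplitTok ≤ 1 →
    pvPhase2A ts [f, sec] 0 = [(pvPhase2B ts f sec false).1, (pvPhase2B ts f sec false).2] := by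
  intro ts
  induction ts with
  | nil => intro f sec _; simp [pvPhase2A, pvPhase2B]
  | cons t ts ih =>
    intro f sec hcnt
    rw [List.countP_cons] at hcnt
    rw [pvPhase2A_cons, pvPhase2B_cons]
    by_cases hsp : pvIsSplitTok t = true
    · obtain ⟨hin, hbet⟩ := (pvSplitTok_iff t).mp hsp
      have hBc := of_decide_eq_true hsp
      obtain ⟨h0, -, -⟩ := pvSemi_facts t hin
      rw [if_pos ⟨hin, hbet⟩, if_pos hBc, if_neg (by simp)]
      rw [PySem.List.slice_to t h0,
        show PySem.List.slice t (some (PySem.Chars.find t [';'] + 1)) none =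
          t.drop ((PySem.Chars.find t [';']).toNat + 1) by
            rw [PySem.List.slice_from t (by omega)]; congr 1; omega]
      rw [pvAppendAt_zero, pvAppendAt_one]
      rw [hsp] at hcnt
      simp at hcnt
      exact pvPhase2_one ts _ _ (List.countP_eq_zero.mpr (fun a ha => by simp [hcnt a ha]))
    · have hns : pvIsSplitTok t = false := by simpa using hsp
      have hA : ¬ (PySem.Chars.isIn [';'] t = true ∧
          pvBetween t (PySem.Chars.find t [';']).toNat = false) := by
        rw [← pvSplitTok_iff, hns]; simp
      have hB := of_decide_eq_false hns
      rw [if_neg hA, if_neg hB, if_neg (by simp), pvAppendAt_zero]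
      rw [hns] at hcnt
      exact ih (f ++ [t]) sec (by simpa using hcnt)

-- ===== VERDICT (by name: the statement is the Claim_ definition above) =====
theorem get_repeats_spec : Claim_equal_get_repeats := by
  intro object _ hpre
  unfold Pre_get_repeats pvTokens at hpre
  unfold Spec_get_repeats
  simp only [get_repeats, get_repeats_alt]
  have hcore : pvCoreB = pvCoreA := rfl
  rw [hcore]
  have htoks : pvMainB (pvCoreA object ++ [','])
      (pvMaskScan '[' ']' (pvCoreA object ++ [',']) false)
      ((pvMaskScan ']' '[' (pvCoreA object ++ [',']).reverse false).reverse) 0 [] [] =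
      pvMainA (pvCoreA object ++ [',']) 0 0 [] [] := by
    have := pvMain_eq (pvCoreA object ++ [',']) 0 0 [] []
    simpa using this.symm
  rw [htoks] at hpre
  rw [htoks]
  rw [pvPhase2_zero _ [] [] hpre]
  rw [PySem.List.pyGetD_zero_cons]
  simp [PySem.List.pyGetD, PySem.List.pyGet?, PySem.List.pyIdx?]
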